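-- pv_equiv track=rewrite | github.com/Bradley94/misc-theory-work | Codewars/level7/Gauß_100_sum.py | f
-- ===== SOURCE A (Python) =====
-- def f(n):
--     x = 1
--     y = n
--     total = 0
--
--     if n == 1:
--         return 1
--     else:
--         while x <= 50 and y >= 51:
--             total += x + y
--             x += 1
--             y -= 1
--
--     return total
-- ===== SOURCE B (Python) =====
-- def f(n):
--     if n == 1:
--         return 1
--     k = min(50, n - 50)
--     return k * (n + 1) if k > 0 else 0
-- ===== Notes on version B (the rewrite author's own statement) =====
-- stated objective: simpler
-- what changed: Replaces the bounded while-loop accumulation (each iteration adds the constant x+y = n+1) with the closed form k*(n+1) where k = min(50, n-50) clamped at 0.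
import Mathlib
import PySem

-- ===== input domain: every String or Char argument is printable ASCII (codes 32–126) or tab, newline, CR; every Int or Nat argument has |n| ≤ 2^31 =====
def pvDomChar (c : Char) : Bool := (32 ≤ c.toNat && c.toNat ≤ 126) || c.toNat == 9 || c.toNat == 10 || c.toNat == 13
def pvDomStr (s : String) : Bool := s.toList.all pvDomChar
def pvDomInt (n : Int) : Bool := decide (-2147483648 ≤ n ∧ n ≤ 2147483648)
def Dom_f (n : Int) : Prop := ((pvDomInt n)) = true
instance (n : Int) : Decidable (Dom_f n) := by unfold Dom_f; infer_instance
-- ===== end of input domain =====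

-- B: closed form k*(n+1), k = min(50, n-50) clamped at 0, replacing the bounded while loop (simpler).


-- ===== PORT A =====
-- while x <= 50 and y >= 51: total += x + y; x += 1; y -= 1
-- fuel 50 suffices: x starts at 1 and the guard x ≤ 50 fails after 50 increments
def fLoop (fuel : Nat) (x y total : Int) : Int :=
  match fuel with
  | 0 => total
  | Nat.succ fuel' =>
    if x ≤ 50 ∧ y ≥ 51 then fLoop fuel' (x + 1) (y - 1) (total + (x + y)) else total

def f (n : Int) : Int :=
  if n = 1 then 1 else fLoop 50 1 n 0

-- ===== PORT B =====
def f_alt (n : Int) : Int :=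
  if n = 1 then 1
  else
    let k := min 50 (n - 50)
    if k > 0 then k * (n + 1) else 0

-- ===== PRECONDITION & SPEC =====
def Spec_f (n : Int) (out : Int) : Prop := out = f_alt n
instance (n : Int) (out : Int) : Decidable (Spec_f n out) := by unfold Spec_f; infer_instance

-- ===== CLAIM (what is proved, stated in full; the proofs are below) =====
def Claim_equal_f : Prop := ∀ (n : Int), Dom_f n → Spec_f n (f n)

-- ===== LEMMAS AND PROOFS =====

-- ===== VERDICT (by name: the statement is the Claim_ definition above) =====
-- loop invariant: each iteration adds x+y (preserved), so the loop adds k copies of it,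
-- k = max 0 (min fuel (min (51-x) (y-50)))
theorem fLoop_eq (fuel : Nat) : ∀ (x y total : Int),
    fLoop fuel x y total = total + max 0 (min (fuel : Int) (min (51 - x) (y - 50))) * (x + y) := by
  induction fuel with
  | zero =>
    intro x y total
    simp [fLoop]
  | succ fuel' ih =>
    intro x y total
    rw [fLoop]
    by_cases h : x ≤ 50 ∧ y ≥ 51
    · rw [if_pos h, ih]
      have hk : max 0 (min ((fuel' + 1 : Nat) : Int) (min (51 - x) (y - 50)))
          = 1 + max 0 (min (fuel' : Int) (min (51 - (x + 1)) ((y - 1) - 50))) := by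
        push_cast
        omega
      rw [hk]
      ring
    · rw [if_neg h]
      have : max 0 (min ((fuel' + 1 : Nat) : Int) (min (51 - x) (y - 50))) = 0 := by omega
      rw [this]
      ring

theorem f_spec : Claim_equal_f := by
  intro n _
  unfold Spec_f f f_alt
  by_cases h1 : n = 1
  · simp [h1]
  · rw [if_neg h1, if_neg h1, fLoop_eq]
    have h50 : max 0 (min ((50 : Nat) : Int) (min (51 - 1) (n - 50))) = max 0 (min 50 (n - 50)) := by
      push_cast; omega
    rw [h50]
    by_cases hk : min 50 (n - 50) > 0
    · rw [if_pos hk]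
      have : max 0 (min 50 (n - 50)) = min 50 (n - 50) := by omega
      rw [this]; ring
    · rw [if_neg hk]
      have : max 0 (min 50 (n - 50)) = 0 := by omega
      rw [this]; ring
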